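-- pv_equiv track=rewrite | github.com/JakobTimmermann/coding_challenges | project_euler/p63-powerful_digit_counts/main.py | get_powerful_digit
-- ===== SOURCE A (Python) =====
-- def get_powerful_digit(digit):
--     base = 1
--     number = base**digit
--     count = 0
--     while len(str(number)) < digit + 1:
--         if len(str(number)) == digit:
--             count += 1
--         base += 1
--         number = base**digit
--     return count
-- ===== SOURCE B (Python) =====
-- def get_powerful_digit(digit):
--     # b**digit is strictly increasing in b (b >= 1), so the bases whose
--     # digit-th power has exactly `digit` digits form a contiguous run t..9,
--     # where t is the least base with base**digit >= 10**(digit-1) (any base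
--     # >= 10 overshoots 10**digit).  Binary-search for t and return 10 - t.
--     if digit < 1:
--         return 0
--     lower = 10 ** (digit - 1)
--     lo, hi = 1, 10
--     while lo < hi:
--         mid = (lo + hi) // 2
--         if mid ** digit >= lower:
--             hi = mid
--         else:
--             lo = mid + 1
--     return 10 - lo
-- ===== Notes on version B (the rewrite author's own statement) =====
-- stated objective: faster
-- what changed: Instead of scanning bases one by one and testing each power's digit count via len(str(...)), B binary-searches for the threshold base t = least b with b**digit >= 10**(digit-1) (powers are strictly increasing in the base, so the qualifying bases are exactly the contiguous run t..9) and returns 10 - t arithmetically, with no counting loop and no decimal string conversion at all.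
import Mathlib
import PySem

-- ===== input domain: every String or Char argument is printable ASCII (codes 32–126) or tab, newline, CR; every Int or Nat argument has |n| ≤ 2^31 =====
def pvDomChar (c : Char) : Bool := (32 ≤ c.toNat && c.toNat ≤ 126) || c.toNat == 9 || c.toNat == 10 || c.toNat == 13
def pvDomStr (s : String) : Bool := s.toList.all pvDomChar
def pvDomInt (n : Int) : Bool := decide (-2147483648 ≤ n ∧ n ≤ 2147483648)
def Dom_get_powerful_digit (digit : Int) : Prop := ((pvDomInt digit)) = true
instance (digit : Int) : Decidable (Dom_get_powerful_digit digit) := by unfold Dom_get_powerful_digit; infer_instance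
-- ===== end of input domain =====

-- B replaces A's linear scan with len(str(...)) digit tests by a binary search for the
-- least base t with t^digit ≥ 10^(digit-1) (powers are monotone in the base, so the
-- qualifying bases are the contiguous run t..9) and returns 10 - t (objective: alternative).

-- ===== PORT A =====
-- len(str(base**digit)).  For digit < 0 Python computes the FLOAT 1.0 (= 1**digit, base
-- is still 1 there since the loop body never runs) and len(str(1.0)) = len("1.0") = 3;
-- that branch is hand-ported and exact because A only evaluates it with base = 1.
def lenStrPow (base digit : Int) : Int :=
  if 0 ≤ digit then PySem.Str.len (PySem.Int.toStr (base ^ digit.toNat))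
  else 3

-- A's while loop; `fuel` is a termination guard only: the loop body runs at most 10
-- times (at base = 10 the condition len(str(10**digit)) < digit + 1 is false), so
-- fuel 11 is never exhausted.
def loopA (digit : Int) : Nat → Int → Int → Int
  | 0, _, count => count
  | f + 1, base, count =>
      if lenStrPow base digit < digit + 1 then
        loopA digit f (base + 1) (if lenStrPow base digit = digit then count + 1 else count)
      else count

def get_powerful_digit (digit : Int) : Int := loopA digit 11 1 0

-- ===== PORT B =====
-- B's while-loop (binary search); `fuel` is a termination guard only: the width hi - lo
-- starts at 9 and strictly decreases each iteration, so fuel 9 is never exhausted.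
def bsearchB (lower : Int) (d : Nat) : Nat → Int → Int → Int
  | 0, lo, _ => lo
  | f + 1, lo, hi =>
      if lo < hi then
        let mid := PySem.Int.floordiv (lo + hi) 2
        if lower ≤ mid ^ d then bsearchB lower d f lo mid
        else bsearchB lower d f (mid + 1) hi
      else lo

def get_powerful_digit_alt (digit : Int) : Int :=
  if digit < 1 then 0
  else
    let lower : Int := 10 ^ (digit - 1).toNat
    10 - bsearchB lower digit.toNat 9 1 10

-- ===== PRECONDITION & SPEC =====
def Spec_get_powerful_digit (digit : Int) (out : Int) : Prop := out = get_powerful_digit_alt digit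
instance (digit : Int) (out : Int) : Decidable (Spec_get_powerful_digit digit out) := by unfold Spec_get_powerful_digit; infer_instance

-- ===== CLAIM (what is proved, stated in full; the proofs are below) =====
def Claim_equal_get_powerful_digit : Prop := ∀ (digit : Int), Dom_get_powerful_digit digit → Spec_get_powerful_digit digit (get_powerful_digit digit)

-- ===== LEMMAS AND PROOFS =====

-- one-step unfolding of A's loop (definitionally true; convenient for `rw`)
lemma loopA_succ (digit : Int) (f : Nat) (base count : Int) :
    loopA digit (f + 1) base count =
      if lenStrPow base digit < digit + 1 then
        loopA digit f (base + 1) (if lenStrPow base digit = digit then count + 1 else count)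
      else count := rfl

-- `Nat.toDigitsCore` (what `str` prints) has as many characters as `Nat.digits` has digits
lemma toDigitsCore_digits_len :
    ∀ (f n : Nat) (acc : List Char), 0 < n → n < f →
      (Nat.toDigitsCore 10 f n acc).length = (Nat.digits 10 n).length + acc.length := by
  intro f
  induction f with
  | zero => intro n acc hn hf; omega
  | succ f ih =>
    intro n acc hn hf
    rw [Nat.toDigitsCore]
    by_cases h : n / 10 = 0
    · rw [if_pos h, Nat.digits_def' (by norm_num) hn, h]
      simp; omega
    · rw [if_neg h, ih (n / 10) _ (Nat.pos_of_ne_zero h)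
        (by have := Nat.div_lt_self hn (by norm_num : 1 < 10); omega)]
      rw [Nat.digits_def' (by norm_num) hn]
      simp; omega

lemma toDigits_digits_len (n : Nat) (hn : 0 < n) :
    (Nat.toDigits 10 n).length = (Nat.digits 10 n).length := by
  rw [Nat.toDigits, toDigitsCore_digits_len (n + 1) n [] hn (Nat.lt_succ_self n)]
  simp

-- `str` of a ℕ-cast integer prints `Nat.toDigits`
lemma lenStr_natCast (n : Nat) :
    PySem.Str.len (PySem.Int.toStr (n : Int)) = ((Nat.toDigits 10 n).length : Int) := by
  simp [PySem.Int.toStr, PySem.Int.toChars, PySem.Str.len]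
  rw [if_neg (not_lt.mpr (Int.natCast_nonneg n))]

-- `lenStrPow` for a positive base and a ℕ exponent is the decimal digit count
lemma lenStrPow_eq (b : Int) (D : Nat) (hb : 1 ≤ b) :
    lenStrPow b (D : Int) = ((Nat.digits 10 (b.toNat ^ D)).length : Int) := by
  have hb' : b = (b.toNat : Int) := (Int.toNat_of_nonneg (by omega)).symm
  have hpow : b ^ ((D : Int)).toNat = ((b.toNat ^ D : Nat) : Int) := by
    rw [hb']; push_cast; simp
  have hbn : 0 < b.toNat := by omega
  have hn : 0 < b.toNat ^ D := pow_pos hbn D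
  rw [lenStrPow, if_pos (by positivity : (0:Int) ≤ (D : Int)), hpow, lenStr_natCast,
    toDigits_digits_len _ hn]

-- bases 1..9: the loop-continue condition holds (base^D has at most D digits)
lemma cond_continue (D : Nat) (hD : 1 ≤ D) (b : Int) (hb1 : 1 ≤ b) (hb9 : b ≤ 9) :
    lenStrPow b (D : Int) < (D : Int) + 1 := by
  rw [lenStrPow_eq b D hb1]
  have hlt : b.toNat ^ D < 10 ^ D := Nat.pow_lt_pow_left (by omega) (by omega)
  have hle := (Nat.digits_length_le_iff (k := D) (by norm_num : 1 < 10) (b.toNat ^ D)).mpr hlt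
  omega

-- base 10: the loop stops (10^D has D+1 digits)
lemma cond_stop (D : Nat) : ¬ lenStrPow 10 (D : Int) < (D : Int) + 1 := by
  rw [lenStrPow_eq 10 D (by norm_num), show ((10:Int).toNat) = 10 from rfl]
  have := (Nat.lt_digits_length_iff (k := D) (by norm_num : 1 < 10) (10 ^ D)).mpr (le_refl _)
  omega

-- bases 1..9: A's count test ↔ the lower power-of-ten bound 10^(D-1) ≤ b^D
-- (the upper bound b^D < 10^D is automatic for b ≤ 9)
lemma count_iff (D : Nat) (hD : 1 ≤ D) (b : Int) (hb1 : 1 ≤ b) (hb9 : b ≤ 9) :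
    (lenStrPow b (D : Int) = (D : Int)) ↔ (10 : Int) ^ (D - 1) ≤ b ^ D := by
  have hb' : b = (b.toNat : Int) := (Int.toNat_of_nonneg (by omega)).symm
  have hpow : b ^ D = ((b.toNat ^ D : Nat) : Int) := by rw [hb']; push_cast; simp
  have h10lo : (10 : Int) ^ (D - 1) = ((10 ^ (D - 1) : Nat) : Int) := by push_cast; ring
  rw [lenStrPow_eq b D hb1, hpow, h10lo]
  have hub : b.toNat ^ D < 10 ^ D := Nat.pow_lt_pow_left (by omega) (by omega)
  have hle := Nat.digits_length_le_iff (k := D) (by norm_num : 1 < 10) (b.toNat ^ D)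
  have hlt := Nat.lt_digits_length_iff (k := D - 1) (by norm_num : 1 < 10) (b.toNat ^ D)
  constructor
  · intro h
    have hlen : (Nat.digits 10 (b.toNat ^ D)).length = D := by exact_mod_cast h
    have hge := hlt.mp (by omega)
    exact_mod_cast hge
  · intro h1
    have hlo : 10 ^ (D - 1) ≤ b.toNat ^ D := by exact_mod_cast h1
    have e1 := hle.mpr hub
    have e2 := hlt.mpr hlo
    have : (Nat.digits 10 (b.toNat ^ D)).length = D := by omega
    exact_mod_cast this

-- A's loop, once inside the counting regime, is the fold over the remaining bases
lemma loopA_spec (D : Nat) (hD : 1 ≤ D) :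
    ∀ (f : Nat) (b c : Int), 1 ≤ b → b ≤ 10 → (11 : Int) ≤ b + f →
      loopA (D : Int) f b c =
        (PySem.List.pyRange b 10 1).foldl
          (fun acc x => if lenStrPow x (D : Int) = (D : Int) then acc + 1 else acc) c := by
  intro f
  induction f with
  | zero => intro b c hb1 hb10 hfuel; simp at hfuel; omega
  | succ f ih =>
    intro b c hb1 hb10 hfuel
    by_cases hb9 : b ≤ 9
    · rw [loopA_succ, if_pos (cond_continue D hD b hb1 hb9),
        ih (b + 1) _ (by omega) (by omega) (by push_cast at hfuel ⊢; omega),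
        PySem.List.pyRange_one_cons (by omega : b < 10), List.foldl_cons]
    · have hb : b = 10 := by omega
      subst hb
      rw [loopA_succ, if_neg (cond_stop D),
        PySem.List.pyRange_one_eq_nil (by omega), List.foldl_nil]

-- B's binary search finds the least element of [lo, hi] satisfying the (monotone-upward)
-- predicate `lower ≤ ·^D`, provided the top of the interval satisfies it.
lemma bsearchB_spec (lower : Int) (D : Nat) :
    ∀ (f : Nat) (lo hi : Int), 1 ≤ lo → lo ≤ hi → hi - lo ≤ (f : Int) →
      lower ≤ hi ^ D →
      lo ≤ bsearchB lower D f lo hi ∧ bsearchB lower D f lo hi ≤ hi ∧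
        lower ≤ (bsearchB lower D f lo hi) ^ D ∧
        (bsearchB lower D f lo hi = lo ∨ ¬ lower ≤ (bsearchB lower D f lo hi - 1) ^ D) := by
  intro f
  induction f with
  | zero =>
    intro lo hi h1 hlh hf hhi
    have : lo = hi := by omega
    subst this
    exact ⟨le_refl _, le_refl _, hhi, Or.inl rfl⟩
  | succ f ih =>
    intro lo hi h1 hlh hf hhi
    by_cases hlt : lo < hi
    · rw [bsearchB, if_pos hlt]
      have hmid := PySem.Int.floordiv_two_mid_bounds (le_of_lt hlt)
      set mid := PySem.Int.floordiv (lo + hi) 2 with hmiddef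
      have hmidlt : mid < hi := by
        rw [hmiddef, PySem.Int.floordiv_lt_iff_lt_mul (by norm_num : (0:Int) < 2)]
        omega
      by_cases hp : lower ≤ mid ^ D
      · simp only [if_pos hp]
        obtain ⟨r1, r2, r3, r4⟩ := ih lo mid h1 hmid.1 (by push_cast at hf ⊢; omega) hp
        exact ⟨r1, by omega, r3, r4⟩
      · simp only [if_neg hp]
        obtain ⟨r1, r2, r3, r4⟩ := ih (mid + 1) hi (by omega) (by omega)
          (by push_cast at hf ⊢; omega) hhi
        refine ⟨by omega, r2, r3, Or.inr ?_⟩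
        rcases r4 with h | h
        · rw [h]; simpa using hp
        · exact h
    · rw [bsearchB, if_neg hlt]
      have : lo = hi := by omega
      subst this
      exact ⟨le_refl _, le_refl _, hhi, Or.inl rfl⟩

-- ===== VERDICT (by name: the statement is the Claim_ definition above) =====
theorem get_powerful_digit_spec : Claim_equal_get_powerful_digit := by
  intro digit _
  unfold Spec_get_powerful_digit
  by_cases h1 : 1 ≤ digit
  · obtain ⟨D, rfl⟩ : ∃ D : Nat, digit = (D : Int) :=
      ⟨digit.toNat, (Int.toNat_of_nonneg (by omega)).symm⟩
    have hD : 1 ≤ D := by exact_mod_cast h1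
    have hDnat : ((D : Int)).toNat = D := by simp
    have hDsub : (((D : Int)) - 1).toNat = D - 1 := by omega
    set L : Int := 10 ^ (D - 1) with hLdef
    -- monotonicity of the search predicate
    have hmono : ∀ a b : Int, 1 ≤ a → a ≤ b → L ≤ a ^ D → L ≤ b ^ D := by
      intro a b ha hab hLa
      exact le_trans hLa (pow_le_pow_left₀ (by omega) hab D)
    -- top of the interval satisfies it: 10^(D-1) ≤ 10^D
    have htop : L ≤ (10 : Int) ^ D :=
      pow_le_pow_right₀ (by norm_num : (1:Int) ≤ 10) (by omega)
    obtain ⟨ht1, ht10, htP, htmin⟩ :=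
      bsearchB_spec L D 9 1 10 (by norm_num) (by norm_num) (by norm_num) htop
    set t : Int := bsearchB L D 9 1 10 with htdef
    -- the counting predicate is `t ≤ x` on 1..9
    have hiff : ∀ x : Int, 1 ≤ x → x ≤ 9 →
        ((lenStrPow x (D : Int) = (D : Int)) ↔ t ≤ x) := by
      intro x hx1 hx9
      rw [count_iff D hD x hx1 hx9]
      constructor
      · intro hP
        by_contra hxt
        rcases htmin with h | h
        · omega
        · exact h (hmono x (t - 1) hx1 (by omega) hP)
      · intro hxt
        exact hmono t x ht1 hxt htP
    -- rewrite A to the fold counting `t ≤ x`, then compute for each possible t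
    rw [get_powerful_digit, get_powerful_digit_alt,
      if_neg (by exact_mod_cast not_lt.mpr h1), loopA_spec D hD 11 1 0
        (by norm_num) (by norm_num) (by norm_num)]
    simp only [hDnat, hDsub, ← hLdef, ← htdef]
    have hfold : (PySem.List.pyRange 1 10 1).foldl
        (fun (acc : Int) x => if lenStrPow x (D : Int) = (D : Int) then acc + 1 else acc) 0 =
        (PySem.List.pyRange 1 10 1).foldl
        (fun (acc : Int) x => if t ≤ x then acc + 1 else acc) 0 := by
      refine PySem.List.foldl_congr_mem _ _ _ _ (fun acc x hx => ?_)
      obtain ⟨hx1, hx10⟩ := PySem.List.mem_pyRange_one.mp hx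
      simp only [hiff x hx1 (by omega)]
    have hlist : PySem.List.pyRange (1:Int) 10 1 = [1,2,3,4,5,6,7,8,9] := by
      rw [PySem.List.pyRange_one]; decide
    refine hfold.trans ?_
    rw [hlist]
    clear_value t
    -- t ∈ [1, 10]: finitely many cases, each a concrete fold
    interval_cases t <;> decide
  · rw [get_powerful_digit_alt, if_pos (by omega)]
    show loopA digit (10 + 1) 1 0 = 0
    rw [loopA_succ, if_neg ?_]
    by_cases h0 : 0 ≤ digit
    · have hz : digit = 0 := by omega
      subst hz; decide
    · rw [lenStrPow, if_neg h0]; omega
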